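-- pv_equiv track=rewrite | github.com/baddyscience/develop | algorithmTopic/字符串chhc子串权值求和.py | solution
-- ===== SOURCE A (Python) =====
-- def solution(s):
--     str="chhc"
--     total_count = 0
--     target_length = len(str)
--     n = len(s)
--
--     for i in range(n):
--         for j in range(i + 1, n + 1):
--             substring = s[i:j]
--             count = 0
--             start = 0
--
--             while True:
--                 start = substring.find(str, start)
--                 if start == -1:
--                     break
--                 count += 1
--                 start += 1
--
--             total_count += count
--
--     return total_count
-- ===== SOURCE B (Python) =====
-- def solution(s):
--     n = len(s)
--     total = 0
--     for p in range(n - 3):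
--         if s[p:p+4] == "chhc":
--             total += (p + 1) * (n - p - 3)
--     return total
-- ===== Notes on version B (the rewrite author's own statement) =====
-- stated objective: faster
-- what changed: Instead of enumerating all O(n^2) substrings and running a find-loop on each, B makes a single scan over the string and, for each occurrence of 'chhc' at position p, adds the number (p+1)*(n-p-3) of substrings that contain it.
import Mathlib
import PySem

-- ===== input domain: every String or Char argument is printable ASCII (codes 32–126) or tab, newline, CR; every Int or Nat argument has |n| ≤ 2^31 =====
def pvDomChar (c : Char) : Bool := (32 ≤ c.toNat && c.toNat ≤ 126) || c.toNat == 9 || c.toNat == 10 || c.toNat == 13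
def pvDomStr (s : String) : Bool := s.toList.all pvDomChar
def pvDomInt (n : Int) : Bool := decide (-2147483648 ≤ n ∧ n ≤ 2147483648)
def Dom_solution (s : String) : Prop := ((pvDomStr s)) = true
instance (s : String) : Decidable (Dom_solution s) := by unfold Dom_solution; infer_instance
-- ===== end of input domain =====

-- B replaces A's cubic scan over all substrings by a single linear scan over the
-- occurrences of "chhc", adding for each occurrence at p its number of enclosing
-- substrings (p+1)*(n-p-3); measured asymptotically faster.

-- ===== PORT A =====
def pvChhc : List Char := ['c', 'h', 'h', 'c']

-- A's inner `while True: start = substring.find("chhc", start); …` loop;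
-- the fuel argument only makes the recursion total (sub.length + 1 steps always suffice).
def pvCountLoop (sub : List Char) (count start : Int) : Nat → Int
  | 0 => count
  | fuel + 1 =>
    let f := PySem.Chars.findFrom sub pvChhc start
    if f = -1 then count
    else pvCountLoop sub (count + 1) (f + 1) fuel

def solution (s : String) : Int :=
  let n : Int := PySem.Str.len s
  (PySem.List.pyRange 0 n 1).foldl (fun total i =>
    (PySem.List.pyRange (i + 1) (n + 1) 1).foldl (fun total j =>
      let substring := PySem.Chars.slice s.toList (some i) (some j)
      total + pvCountLoop substring 0 0 (substring.length + 1)) total) 0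

-- ===== PORT B =====
def solution_alt (s : String) : Int :=
  let n : Int := PySem.Str.len s
  (PySem.List.pyRange 0 (n - 3) 1).foldl (fun total p =>
    if PySem.Chars.slice s.toList (some p) (some (p + 4)) = pvChhc then
      total + (p + 1) * (n - p - 3)
    else total) 0

-- ===== PRECONDITION & SPEC =====
def Spec_solution (s : String) (out : Int) : Prop := out = solution_alt s
instance (s : String) (out : Int) : Decidable (Spec_solution s out) := by unfold Spec_solution; infer_instance

-- ===== CLAIM (what is proved, stated in full; the proofs are below) =====
def Claim_equal_solution : Prop := ∀ (s : String), Dom_solution s → Spec_solution s (solution s)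

-- ===== LEMMAS AND PROOFS =====

-- occurrence of "chhc" at position p of t
def pvOcc (t : List Char) (p : Nat) : Bool := decide ((t.drop p).take 4 = pvChhc)

-- number of occurrences at positions ≥ k
def pvMC (t : List Char) (k : Nat) : Nat := (List.range' k (t.length - k)).countP (pvOcc t)

-- number of occurrences of "chhc" inside s[i:j]
def pvC (t : List Char) (i j : Nat) : Int :=
  ∑ p ∈ Finset.range t.length, if i ≤ p ∧ p + 4 ≤ j ∧ pvOcc t p then 1 else 0

lemma pvOcc_iff_prefix (t : List Char) (p : Nat) :
    pvOcc t p = true ↔ pvChhc <+: t.drop p := by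
  rw [List.prefix_iff_eq_take]
  simp [pvOcc, eq_comm, show pvChhc.length = 4 from rfl]

lemma pvOcc_le_length (t : List Char) (p : Nat) (h : pvOcc t p = true) :
    p + 4 ≤ t.length := by
  simp only [pvOcc, decide_eq_true_eq] at h
  have := congrArg List.length h
  simp only [List.length_take, List.length_drop, show pvChhc.length = 4 from rfl] at this
  omega

-- no occurrence at or after k when "chhc" is not an infix of the k-suffix
lemma pvMC_eq_zero (sub : List Char) (k : Nat) (h : ¬ pvChhc <:+: sub.drop k) :
    pvMC sub k = 0 := by
  rw [pvMC, List.countP_eq_zero]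
  intro p hp hocc
  have hkp : k ≤ p := (List.mem_range'_1.mp hp).1
  have hpre : pvChhc <+: (sub.drop k).drop (p - k) := by
    rw [List.drop_drop, Nat.add_sub_cancel' hkp]
    exact (pvOcc_iff_prefix sub p).mp hocc
  exact h (hpre.isInfix.trans (List.drop_suffix _ _).isInfix)

-- peel the first occurrence m off the count
lemma pvMC_succ (sub : List Char) (k m : Nat) (hkm : k ≤ m)
    (hm : pvOcc sub m = true)
    (hmin : ∀ i, k ≤ i → i < m → ¬ pvChhc <+: sub.drop i) :
    pvMC sub k = pvMC sub (m + 1) + 1 := by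
  have hm4 : m + 4 ≤ sub.length := pvOcc_le_length sub m hm
  have h1 : List.range' k (sub.length - k)
      = List.range' k (m - k) ++ List.range' m (sub.length - m) := by
    rw [show List.range' m (sub.length - m) = List.range' (k + 1 * (m - k)) (sub.length - m) by
          congr 1; omega,
        List.range'_append]
    congr 1; omega
  have h2 : List.range' m (sub.length - m) = m :: List.range' (m + 1) (sub.length - (m + 1)) := by
    rw [show sub.length - m = (sub.length - (m + 1)) + 1 by omega, List.range'_succ]
  rw [pvMC, h1, List.countP_append, h2, List.countP_cons, pvMC]
  have hz : (List.range' k (m - k)).countP (pvOcc sub) = 0 := by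
    rw [List.countP_eq_zero]
    intro p hp hocc
    have hb := List.mem_range'_1.mp hp
    exact hmin p hb.1 (by omega) ((pvOcc_iff_prefix sub p).mp hocc)
  rw [hz, hm]
  simp

-- A's find-loop counts the occurrences at positions ≥ k (fuel ≥ remaining length suffices)
lemma pvCountLoop_eq (sub : List Char) (fuel : Nat) : ∀ (c : Int) (k : Nat),
    k ≤ sub.length → sub.length + 1 - k ≤ fuel →
    pvCountLoop sub c (k : Int) fuel = c + pvMC sub k := by
  induction fuel with
  | zero => intro c k hk hf; omega
  | succ fuel ih =>
    intro c k hk hf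
    simp only [pvCountLoop]
    by_cases hfind : PySem.Chars.findFrom sub pvChhc (k : Int) = -1
    · rw [if_pos hfind,
        pvMC_eq_zero sub k ((PySem.Chars.findFrom_natCast_eq_neg_one_iff sub pvChhc k hk).mp hfind)]
      simp
    · obtain ⟨hkf, hpre, hmin⟩ := PySem.Chars.findFrom_natCast_spec sub pvChhc k hk hfind
      set f := PySem.Chars.findFrom sub pvChhc (k : Int) with hfdef
      set m := f.toNat with hmdef
      have hfm : f = (m : Int) := by omega
      have hocc : pvOcc sub m = true := (pvOcc_iff_prefix sub m).mpr hpre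
      have hm4 : m + 4 ≤ sub.length := pvOcc_le_length sub m hocc
      have hkm : k ≤ m := by omega
      have step : pvCountLoop sub (c + 1) (f + 1) fuel = c + 1 + pvMC sub (m + 1) := by
        rw [hfm, show ((m : Int) + 1) = ((m + 1 : Nat) : Int) by push_cast; ring]
        exact ih (c + 1) (m + 1) (by omega) (by omega)
      simp only [if_neg hfind, step, pvMC_succ sub k m hkm hocc hmin]
      push_cast; ring

lemma pvSum_map_range (n : Nat) (f : Nat → Int) :
    ((List.range n).map f).sum = ∑ i ∈ Finset.range n, f i := rfl

lemma pvSum_ite_count (n : Nat) (P : Nat → Prop) [DecidablePred P] :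
    (∑ p ∈ Finset.range n, if P p then (1 : Int) else 0)
      = ((List.range n).countP (fun p => decide (P p)) : Int) := by
  induction n with
  | zero => simp
  | succ m ih =>
    rw [Finset.sum_range_succ, List.range_succ, List.countP_append, ih]
    by_cases h : P m <;> simp [h]

lemma pvOcc_slice (t : List Char) (i j q : Nat) (hij : i ≤ j) (hj : j ≤ t.length) :
    pvOcc ((t.drop i).take (j - i)) q = (pvOcc t (i + q) && decide (q + 4 ≤ j - i)) := by
  have hdrop : ((t.drop i).take (j - i)).drop q = (t.drop (i + q)).take (j - i - q) := by
    rw [List.drop_take, List.drop_drop]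
  by_cases h4 : q + 4 ≤ j - i
  · rw [pvOcc, hdrop, List.take_take, show min 4 (j - i - q) = 4 by omega]
    simp [pvOcc, h4]
  · have hne : (t.drop (i + q)).take (j - i - q) ≠ pvChhc := by
      intro he
      have := congrArg List.length he
      simp only [List.length_take, List.length_drop, show pvChhc.length = 4 from rfl] at this
      omega
    simp [pvOcc, hdrop, List.take_take, show min 4 (j - i - q) = j - i - q by omega, hne, h4]

lemma pvRange_split (t : List Char) (i j : Nat) (hij : i ≤ j) (hj : j ≤ t.length) :
    List.range t.length
      = List.range' 0 i ++ ((List.range (j - i)).map (i + ·) ++ List.range' j (t.length - j)) := by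
  have e2 := @List.range'_append i (j - i) (t.length - j) 1
  rw [Nat.one_mul, Nat.add_sub_cancel' hij, show j - i + (t.length - j) = t.length - i by omega] at e2
  have e1 := @List.range'_append 0 i (t.length - i) 1
  rw [Nat.one_mul, Nat.zero_add, Nat.add_sub_cancel' (le_trans hij hj)] at e1
  rw [List.range_eq_range', ← e1, ← e2, ← List.range'_eq_map_range]

-- the count inside the slice s[i:j], as a sum over positions of the whole string
lemma pvMC_slice (t : List Char) (i j : Nat) (hij : i ≤ j) (hj : j ≤ t.length) :
    (pvMC ((t.drop i).take (j - i)) 0 : Int) = pvC t i j := by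
  have hlen : ((t.drop i).take (j - i)).length = j - i := by
    simp only [List.length_take, List.length_drop]; omega
  have lhs : pvMC ((t.drop i).take (j - i)) 0
      = (List.range (j - i)).countP (fun q => pvOcc t (i + q) && decide (q + 4 ≤ j - i)) := by
    rw [pvMC, hlen, Nat.sub_zero, ← List.range_eq_range']
    exact List.countP_congr fun q _ => by rw [pvOcc_slice t i j q hij hj]
  rw [pvC, pvSum_ite_count, lhs]
  congr 1
  rw [pvRange_split t i j hij hj, List.countP_append, List.countP_append, List.countP_map]
  have z1 : (List.range' 0 i).countP (fun p => decide (i ≤ p ∧ p + 4 ≤ j ∧ pvOcc t p)) = 0 := by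
    rw [List.countP_eq_zero]
    intro p hp
    have hb := List.mem_range'_1.mp hp
    simp only [decide_eq_true_eq]
    rintro ⟨h1, -, -⟩; omega
  have z2 : (List.range' j (t.length - j)).countP
      (fun p => decide (i ≤ p ∧ p + 4 ≤ j ∧ pvOcc t p)) = 0 := by
    rw [List.countP_eq_zero]
    intro p hp
    have hb := List.mem_range'_1.mp hp
    simp only [decide_eq_true_eq]
    rintro ⟨-, h2, -⟩; omega
  rw [z1, z2]
  have hcong : (List.range (j - i)).countP
        ((fun p => decide (i ≤ p ∧ p + 4 ≤ j ∧ pvOcc t p)) ∘ (i + ·))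
      = (List.range (j - i)).countP (fun q => pvOcc t (i + q) && decide (q + 4 ≤ j - i)) := by
    apply List.countP_congr
    intro q hq
    by_cases h4 : q + 4 ≤ j - i <;> by_cases ho : pvOcc t (i + q) = true <;>
      simp [Function.comp, h4, ho] <;> omega
  rw [hcong]
  omega

-- the combinatorial identity behind B: swap the summation order
lemma pvSum_swap (t : List Char) :
    (∑ i ∈ Finset.range t.length, ∑ j ∈ Finset.Icc (i + 1) t.length, pvC t i j)
      = ∑ p ∈ Finset.range t.length,
          (if pvOcc t p then ((p : Int) + 1) * ((t.length : Int) - p - 3) else 0) := by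
  unfold pvC
  rw [show (∑ i ∈ Finset.range t.length, ∑ j ∈ Finset.Icc (i + 1) t.length,
        ∑ p ∈ Finset.range t.length, if i ≤ p ∧ p + 4 ≤ j ∧ pvOcc t p then (1:Int) else 0)
      = ∑ p ∈ Finset.range t.length, ∑ i ∈ Finset.range t.length,
        ∑ j ∈ Finset.Icc (i + 1) t.length, if i ≤ p ∧ p + 4 ≤ j ∧ pvOcc t p then (1:Int) else 0 by
    rw [Finset.sum_comm]
    exact Finset.sum_congr rfl fun p _ => Finset.sum_comm]
  apply Finset.sum_congr rfl
  intro p hp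
  have hpn : p < t.length := Finset.mem_range.mp hp
  by_cases hocc : pvOcc t p = true
  · have hp4 : p + 4 ≤ t.length := pvOcc_le_length t p hocc
    rw [if_pos hocc]
    have inner : ∀ i, i ≤ p →
        (∑ j ∈ Finset.Icc (i + 1) t.length, if i ≤ p ∧ p + 4 ≤ j ∧ pvOcc t p then (1:Int) else 0)
          = ((t.length : Int) - p - 3) := by
      intro i hip
      have hsimp : ∀ j, (if i ≤ p ∧ p + 4 ≤ j ∧ pvOcc t p then (1:Int) else 0)
          = (if p + 4 ≤ j then (1:Int) else 0) := by
        intro j; by_cases h : p + 4 ≤ j <;> simp [h, hip, hocc]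
      simp only [hsimp]
      rw [Finset.sum_boole]
      rw [show Finset.filter (fun j => p + 4 ≤ j) (Finset.Icc (i + 1) t.length)
            = Finset.Icc (p + 4) t.length by
        ext j; simp only [Finset.mem_filter, Finset.mem_Icc]; omega]
      rw [Nat.card_Icc]
      omega
    have outer : ∀ i, ¬ i ≤ p →
        (∑ j ∈ Finset.Icc (i + 1) t.length, if i ≤ p ∧ p + 4 ≤ j ∧ pvOcc t p then (1:Int) else 0)
          = 0 := by
      intro i hip
      apply Finset.sum_eq_zero
      intro j _
      simp [hip]
    calc (∑ i ∈ Finset.range t.length,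
            ∑ j ∈ Finset.Icc (i + 1) t.length, if i ≤ p ∧ p + 4 ≤ j ∧ pvOcc t p then (1:Int) else 0)
        = ∑ i ∈ Finset.range t.length,
            (if i ≤ p then ((t.length : Int) - p - 3) else 0) := by
          apply Finset.sum_congr rfl
          intro i _
          by_cases hip : i ≤ p
          · rw [if_pos hip, inner i hip]
          · rw [if_neg hip, outer i hip]
      _ = ((p : Int) + 1) * ((t.length : Int) - p - 3) := by
          rw [← Finset.sum_filter,
            show Finset.filter (fun i => i ≤ p) (Finset.range t.length) = Finset.range (p + 1) by
              ext i; simp only [Finset.mem_filter, Finset.mem_range]; omega,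
            Finset.sum_const, Finset.card_range, nsmul_eq_mul]
          push_cast; ring
  · rw [if_neg hocc]
    apply Finset.sum_eq_zero
    intro i _
    apply Finset.sum_eq_zero
    intro j _
    simp [hocc]

-- a Python range, mapped and summed, as a Finset sum
lemma pvSum_pyRange (a b : Int) (F : Int → Int) :
    ((PySem.List.pyRange a b 1).map F).sum
      = ∑ k ∈ Finset.range ((b - a).toNat), F (a + (k : Int)) := by
  rw [PySem.List.pyRange_one, List.map_map, pvSum_map_range]
  rfl

lemma solution_eq_sum (s : String) :
    solution s
      = ∑ i ∈ Finset.range s.toList.length,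
          ∑ j ∈ Finset.Icc (i + 1) s.toList.length, pvC s.toList i j := by
  simp only [solution, PySem.Str.len_eq, PySem.Chars.slice, PySem.List.foldl_add, zero_add]
  rw [pvSum_pyRange, show (((s.toList.length : Int) - 0).toNat) = s.toList.length by omega]
  apply Finset.sum_congr rfl
  intro ki hki
  have hkin : ki < s.toList.length := Finset.mem_range.mp hki
  rw [pvSum_pyRange,
    show ((((s.toList.length : Int) + 1) - (0 + (ki : Int) + 1)).toNat)
      = s.toList.length - ki by omega]
  rw [show Finset.Icc (ki + 1) s.toList.length = Finset.Ico (ki + 1) (s.toList.length + 1) from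
      (Finset.Ico_add_one_right_eq_Icc (ki + 1) s.toList.length).symm,
    Finset.sum_Ico_eq_sum_range,
    show s.toList.length + 1 - (ki + 1) = s.toList.length - ki by omega]
  apply Finset.sum_congr rfl
  intro kj hkj
  have hkjn : kj < s.toList.length - ki := Finset.mem_range.mp hkj
  rw [show ((0 : Int) + (ki : Int)) = ((ki : Nat) : Int) by ring,
    show ((ki : Int) + 1 + (kj : Int)) = ((ki + 1 + kj : Nat) : Int) by push_cast; ring,
    PySem.List.slice_natCast,
    show ((0 : Int)) = (((0 : Nat)) : Int) from rfl,
    pvCountLoop_eq _ _ _ 0 (Nat.zero_le _) (by omega),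
    ← pvMC_slice s.toList ki (ki + 1 + kj) (by omega) (by omega)]
  push_cast
  ring

lemma solution_alt_eq_sum (s : String) :
    solution_alt s
      = ∑ p ∈ Finset.range s.toList.length,
          (if pvOcc s.toList p then ((p : Int) + 1) * ((s.toList.length : Int) - p - 3) else 0) := by
  have hfun : (fun (total p : Int) =>
        if PySem.List.slice s.toList (some p) (some (p + 4)) = pvChhc then
          total + (p + 1) * ((s.toList.length : Int) - p - 3)
        else total)
      = fun (total p : Int) => total +
          (if PySem.List.slice s.toList (some p) (some (p + 4)) = pvChhc then
            (p + 1) * ((s.toList.length : Int) - p - 3) else 0) := by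
    funext total p
    split_ifs <;> simp
  simp only [solution_alt, PySem.Str.len_eq, PySem.Chars.slice]
  rw [hfun, PySem.List.foldl_add, zero_add, pvSum_pyRange,
    show (((s.toList.length : Int) - 3 - 0).toNat) = s.toList.length - 3 by omega]
  have lhs_eq : (∑ k ∈ Finset.range (s.toList.length - 3),
        (if PySem.List.slice s.toList (some (0 + (k : Int))) (some (0 + (k : Int) + 4)) = pvChhc
          then (0 + (k : Int) + 1) * ((s.toList.length : Int) - (0 + (k : Int)) - 3) else 0))
      = ∑ k ∈ Finset.range (s.toList.length - 3),
          (if pvOcc s.toList k then ((k : Int) + 1) * ((s.toList.length : Int) - k - 3) else 0) := by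
    apply Finset.sum_congr rfl
    intro k hk
    rw [show ((0 : Int) + (k : Int)) = ((k : Nat) : Int) by ring,
      show (((k : Nat) : Int) + 4) = (((k : Nat) : Int) + ((4 : Nat) : Int)) by norm_num,
      PySem.List.slice_natCast_add]
    by_cases ho : pvOcc s.toList k = true
    · rw [if_pos (by simpa [pvOcc] using ho), if_pos ho]
    · rw [if_neg (by simpa [pvOcc] using ho), if_neg (by simpa using ho)]
  rw [lhs_eq]
  have hsplit := Finset.sum_Ico_consecutive
      (fun p => if pvOcc s.toList p then ((p : Int) + 1) * ((s.toList.length : Int) - p - 3) else 0)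
      (Nat.zero_le (s.toList.length - 3)) (Nat.sub_le s.toList.length 3)
  have tail : (∑ p ∈ Finset.Ico (s.toList.length - 3) s.toList.length,
      (if pvOcc s.toList p then ((p : Int) + 1) * ((s.toList.length : Int) - p - 3) else 0)) = 0 := by
    apply Finset.sum_eq_zero
    intro p hpm
    have hb := Finset.mem_Ico.mp hpm
    have hocc : pvOcc s.toList p = false := by
      by_contra hc
      have := pvOcc_le_length s.toList p (by simpa using hc)
      omega
    simp [hocc]
  rw [Finset.range_eq_Ico, ← hsplit, tail, add_zero]

-- ===== VERDICT (by name: the statement is the Claim_ definition above) =====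
theorem solution_spec : Claim_equal_solution := by
  intro s _
  unfold Spec_solution
  rw [solution_eq_sum, solution_alt_eq_sum, pvSum_swap]
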